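-- pv_equiv track=rewrite | github.com/styjii/exercise_univerity | base_n°3/base.py | _set_to_character
-- ===== SOURCE A (Python) =====
-- def _set_to_character(e:int) -> str:
--     """convert to character
--
--     Args:
--         e (int): number to convert
--
--     Returns:
--         str: character for the number
--     """
--     characters = ['A', 'B', 'C', 'D', 'E', 'F']
--     numbers = [10, 11, 12, 13, 14, 15]
--     n = len(characters)
--
--     for i in range(n):
--         if e == numbers[i]:
--             return characters[i]
--     return str(e)
-- ===== SOURCE B (Python) =====
-- def _set_to_character(e:int) -> str:
--     """convert to character: closed form instead of scanning parallel lists"""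
--     if 10 <= e <= 15:
--         return chr(e - 10 + ord('A'))
--     return str(e)
-- ===== Notes on version B (the rewrite author's own statement) =====
-- stated objective: simpler
-- what changed: Replaces the linear scan over parallel characters/numbers lists with a closed-form range test computing chr(e-10+ord('A')); str(e) fallback unchanged.
import Mathlib
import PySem

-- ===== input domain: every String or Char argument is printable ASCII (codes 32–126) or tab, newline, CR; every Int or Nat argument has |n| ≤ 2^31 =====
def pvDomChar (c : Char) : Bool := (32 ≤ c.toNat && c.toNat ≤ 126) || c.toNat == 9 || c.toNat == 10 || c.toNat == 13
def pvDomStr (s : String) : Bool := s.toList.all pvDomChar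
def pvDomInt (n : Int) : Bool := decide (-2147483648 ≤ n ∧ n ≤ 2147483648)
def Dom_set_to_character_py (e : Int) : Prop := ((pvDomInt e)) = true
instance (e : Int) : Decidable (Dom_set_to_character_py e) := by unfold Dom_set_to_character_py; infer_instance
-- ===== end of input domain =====

-- B replaces A's scan over parallel lists with a closed-form range test and character arithmetic (objective: simpler).

-- ===== PORT A =====
-- A's for-loop over i in range(n): first match of e in the numbers list, paired with characters.
def pvScanA (e : Int) : List (Int × String) → Option String
  | [] => none
  | (n, c) :: rest => if e = n then some c else pvScanA e rest

def set_to_character_py (e : Int) : String :=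
  match pvScanA e (List.zip [10, 11, 12, 13, 14, 15] ["A", "B", "C", "D", "E", "F"]) with
  | some c => c
  | none => PySem.Int.toStr e

-- ===== PORT B =====
-- chr(e - 10 + ord('A')) for 10 ≤ e ≤ 15, else str(e).
def set_to_character_py_alt (e : Int) : String :=
  if 10 ≤ e ∧ e ≤ 15 then String.ofList [Char.ofNat (e - 10 + 65).toNat] else PySem.Int.toStr e

-- ===== PRECONDITION & SPEC =====
def Spec_set_to_character_py (e : Int) (out : String) : Prop := out = set_to_character_py_alt e
instance (e : Int) (out : String) : Decidable (Spec_set_to_character_py e out) := by unfold Spec_set_to_character_py; infer_instance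

-- ===== CLAIM (what is proved, stated in full; the proofs are below) =====
def Claim_equal_set_to_character_py : Prop := ∀ (e : Int), Dom_set_to_character_py e → Spec_set_to_character_py e (set_to_character_py e)

-- ===== LEMMAS AND PROOFS =====

-- ===== VERDICT (by name: the statement is the Claim_ definition above) =====
theorem set_to_character_py_spec : Claim_equal_set_to_character_py := by
  intro e _
  show set_to_character_py e = set_to_character_py_alt e
  by_cases h10 : e = 10; · subst h10; decide
  by_cases h11 : e = 11; · subst h11; decide
  by_cases h12 : e = 12; · subst h12; decide
  by_cases h13 : e = 13; · subst h13; decide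
  by_cases h14 : e = 14; · subst h14; decide
  by_cases h15 : e = 15; · subst h15; decide
  have hout : ¬(10 ≤ e ∧ e ≤ 15) := by omega
  simp [set_to_character_py, set_to_character_py_alt, pvScanA, h10, h11, h12, h13, h14, h15, hout]
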